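-- pv_equiv track=rewrite | github.com/JeanpRose/python_basics | Python/L07_funzioni/es01_funzioni.py | analisi
-- ===== SOURCE A (Python) =====
-- def analisi (testo):
--     parole = len(testo.split())
--     caratteri = len(testo.replace(" ",""))
--     separatori = [ ".", "!", "?"]
--     frasi = 0
--     for carattere in testo:
--         if carattere in separatori:
--             frasi += 1
--
--
--
--     return f"""
-- Numero di parole: {parole}
-- Numero di caratteri (senza spazi):{caratteri}
-- Numero di frasi: {frasi}
--     """
-- ===== SOURCE B (Python) =====
-- def analisi(testo):
--     parole = 0
--     caratteri = 0
--     frasi = 0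
--     in_parola = False
--     for carattere in testo:
--         if carattere.isspace():
--             in_parola = False
--         else:
--             if not in_parola:
--                 parole += 1
--             in_parola = True
--         if carattere != " ":
--             caratteri += 1
--         if carattere in ".!?":
--             frasi += 1
--     return f"""
-- Numero di parole: {parole}
-- Numero di caratteri (senza spazi):{caratteri}
-- Numero di frasi: {frasi}
--     """
-- ===== Notes on version B (the rewrite author's own statement) =====
-- stated objective: alternative
-- what changed: B makes a single fused pass over the text maintaining the word/char/sentence counters together (word counted at each whitespace-to-nonwhitespace transition), instead of A's three separate traversals via split(), replace() and a loop.
import Mathlib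
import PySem

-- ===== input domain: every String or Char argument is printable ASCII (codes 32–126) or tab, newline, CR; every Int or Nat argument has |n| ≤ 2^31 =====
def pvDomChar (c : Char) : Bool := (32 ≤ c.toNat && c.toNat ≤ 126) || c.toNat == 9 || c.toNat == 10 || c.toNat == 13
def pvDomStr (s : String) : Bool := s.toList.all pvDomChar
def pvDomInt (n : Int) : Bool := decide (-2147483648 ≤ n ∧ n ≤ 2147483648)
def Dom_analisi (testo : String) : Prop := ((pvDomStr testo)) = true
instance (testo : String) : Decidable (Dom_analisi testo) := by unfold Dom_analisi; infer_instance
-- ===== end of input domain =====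

-- B replaces A's three traversals (split, replace, loop) by one fused counting pass over the text.

-- ===== PORT A =====
def analisi (testo : String) : String :=
  let parole : Int := (PySem.Str.split₀ testo).length
  let caratteri : Int := (PySem.Str.replace testo " " "").length
  let separatori : List Char := ['.', '!', '?']
  let frasi : Int := testo.toList.foldl
    (fun frasi carattere => if carattere ∈ separatori then frasi + 1 else frasi) 0
  "\nNumero di parole: " ++ PySem.Int.toStr parole ++
  "\nNumero di caratteri (senza spazi):" ++ PySem.Int.toStr caratteri ++
  "\nNumero di frasi: " ++ PySem.Int.toStr frasi ++ "\n    "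

-- ===== PORT B =====
-- state: (in_parola, parole, caratteri, frasi)
def analisiAltStep (st : Bool × Int × Int × Int) (c : Char) : Bool × Int × Int × Int :=
  let (inP, p, k, f) := st
  let (inP, p) :=
    if PySem.Chars.isspace c then (false, p)
    else (true, if !inP then p + 1 else p)
  let k := if c ≠ ' ' then k + 1 else k
  let f := if c ∈ ['.', '!', '?'] then f + 1 else f
  (inP, p, k, f)

def analisi_alt (testo : String) : String :=
  let st := testo.toList.foldl analisiAltStep (false, 0, 0, 0)
  "\nNumero di parole: " ++ PySem.Int.toStr st.2.1 ++
  "\nNumero di caratteri (senza spazi):" ++ PySem.Int.toStr st.2.2.1 ++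
  "\nNumero di frasi: " ++ PySem.Int.toStr st.2.2.2 ++ "\n    "

-- ===== PRECONDITION & SPEC =====
def Spec_analisi (testo : String) (out : String) : Prop := out = analisi_alt testo
instance (testo : String) (out : String) : Decidable (Spec_analisi testo out) := by unfold Spec_analisi; infer_instance

-- ===== CLAIM (what is proved, stated in full; the proofs are below) =====
def Claim_equal_analisi : Prop := ∀ (testo : String), Dom_analisi testo → Spec_analisi testo (analisi testo)

-- ===== LEMMAS AND PROOFS =====

/-- word count by space→non-space transitions, as B maintains it -/
def wcount : List Char → Bool → Nat
  | [], _ => 0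
  | c :: t, inW =>
    if PySem.Chars.isspace c then wcount t false
    else (if inW then 0 else 1) + wcount t true

lemma split₀_go_length (l : List Char) : ∀ (cur : List Char) (acc : List (List Char)),
    (PySem.Chars.split₀.go l cur acc).length
      = acc.length + (if cur.isEmpty then 0 else 1) + wcount l (!cur.isEmpty) := by
  induction l with
  | nil =>
    intro cur acc
    simp only [PySem.Chars.split₀.go, wcount]
    split_ifs with h <;> simp
  | cons c t ih =>
    intro cur acc
    by_cases hs : PySem.Chars.isspace c <;>
      by_cases hc : cur.isEmpty <;>
        simp [PySem.Chars.split₀.go, wcount, hs, hc, ih] <;> omega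

lemma replace_space_go_length : ∀ (fuel : Nat) (l : List Char) (acc : List Char),
    l.length ≤ fuel →
    (PySem.Chars.replace.go [' '] [] fuel l acc).length
      = acc.length + l.countP (fun c => c ≠ ' ') := by
  intro fuel
  induction fuel with
  | zero =>
    intro l acc h
    have : l = [] := List.eq_nil_of_length_eq_zero (Nat.le_zero.mp h)
    subst this; simp [PySem.Chars.replace.go]
  | succ n ih =>
    intro l acc h
    cases l with
    | nil => simp [PySem.Chars.replace.go]
    | cons c t =>
      by_cases hp : List.isPrefixOf [' '] (c :: t)
      · have hc : c = ' ' := ((by simpa [List.isPrefixOf] using hp : (' ' : Char) = c)).symm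
        subst hc
        simp only [PySem.Chars.replace.go, hp, if_true]
        rw [ih]
        · simp
        · simp at h ⊢; omega
      · have hc : c ≠ ' ' := by
          intro hcc; apply hp; simp [List.isPrefixOf, hcc]
        simp [PySem.Chars.replace.go, hp]
        rw [ih]
        · simp [hc]; omega
        · simp at h; omega

lemma foldl_step_eq (l : List Char) : ∀ (w : Bool) (p k f : Int),
    l.foldl analisiAltStep (w, p, k, f)
      = ((l.foldl analisiAltStep (w, p, k, f)).1,
         p + (wcount l w : Int),
         k + (l.countP (fun c => c ≠ ' ') : Int),
         f + (l.countP (fun c => c ∈ ['.', '!', '?']) : Int)) := by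
  induction l with
  | nil => intro w p k f; simp
  | cons c t ih =>
    intro w p k f
    simp only [List.foldl_cons, analisiAltStep]
    by_cases hs : PySem.Chars.isspace c <;>
      by_cases hw : w <;>
        · simp [hs, hw]
          rw [ih]
          simp [wcount, hs, List.countP_cons, Prod.ext_iff]
          and_intros <;> first
            | rfl
            | omega
            | (split_ifs <;> omega)

lemma frasi_foldl (l : List Char) : ∀ (f : Int),
    l.foldl (fun frasi c => if c ∈ ['.', '!', '?'] then frasi + 1 else frasi) f
      = f + (l.countP (fun c => c ∈ ['.', '!', '?']) : Int) := by
  induction l with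
  | nil => intro f; simp
  | cons c t ih =>
    intro f
    simp only [List.foldl_cons, List.countP_cons]
    rw [ih]; split_ifs <;> first | omega | simp_all

-- ===== VERDICT (by name: the statement is the Claim_ definition above) =====
theorem analisi_spec : Claim_equal_analisi := by
  intro testo _
  have hW : wcount testo.toList false = (PySem.Str.split₀ testo).length := by
    have hmap := PySem.Str.split₀_map_toList testo
    have hlen : (PySem.Str.split₀ testo).length = (PySem.Chars.split₀ testo.toList).length := by
      rw [← hmap, List.length_map]
    rw [hlen]
    show _ = (PySem.Chars.split₀.go testo.toList [] []).length
    rw [split₀_go_length]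
    simp
  have hK : testo.toList.countP (fun c => c ≠ ' ') = (PySem.Str.replace testo " " "").length := by
    have hlen : (PySem.Str.replace testo " " "").length
        = (PySem.Chars.replace testo.toList [' '] []).length := by
      rw [← String.length_toList, PySem.Str.toList_replace]; rfl
    rw [hlen]
    show _ = (PySem.Chars.replace.go [' '] [] testo.toList.length testo.toList []).length
    rw [replace_space_go_length _ _ _ (le_refl _)]
    simp
  have h1 : (testo.toList.foldl analisiAltStep (false, 0, 0, 0)).2.1
      = ((PySem.Str.split₀ testo).length : Int) := by
    rw [foldl_step_eq, ← hW]; simp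
  have h2 : (testo.toList.foldl analisiAltStep (false, 0, 0, 0)).2.2.1
      = ((PySem.Str.replace testo " " "").length : Int) := by
    rw [foldl_step_eq, ← hK]; simp
  have h3 : (testo.toList.foldl analisiAltStep (false, 0, 0, 0)).2.2.2
      = testo.toList.foldl
          (fun frasi carattere => if carattere ∈ ['.', '!', '?'] then frasi + 1 else frasi) 0 := by
    rw [foldl_step_eq]; rw [frasi_foldl]
  show analisi testo = analisi_alt testo
  unfold analisi analisi_alt
  simp only [h1, h2, h3]
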